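-- pv_equiv track=rewrite | github.com/K21173582/Code-Wars | Simple Fun 15 Addition without Carrying.py | addition_without_carrying
-- ===== SOURCE A (Python) =====
-- def addition_without_carrying(a,b):
--     a_str = str(a)  # Convert a to a string
--     b_str = str(b)  # Convert b to a string
--
--     # Make the lengths of a_str and b_str equal by adding leading zeros
--     max_len = max(len(a_str), len(b_str))
--     a_str = a_str.zfill(max_len)
--     b_str = b_str.zfill(max_len)
--
--     result_str = ""
--
--     for i in range(max_len):
--         digit_a = int(a_str[i])
--         digit_b = int(b_str[i])
--
--         # Add the digits and take the last digit of the sum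
--         sum_digits = (digit_a + digit_b) % 10
--
--         # Add the last digit of the sum to the result
--         result_str += str(sum_digits)
--
--     return int(result_str)
-- ===== SOURCE B (Python) =====
-- def addition_without_carrying(a, b):
--     acc = 0
--     place = 1
--     while a > 0 or b > 0:
--         acc += (a % 10 + b % 10) % 10 * place
--         place *= 10
--         a //= 10
--         b //= 10
--     return acc
-- ===== Notes on version B (the rewrite author's own statement) =====
-- stated objective: faster
-- what changed: Replaced the string pipeline (str, zfill, per-character int() and string rebuilding, final int()) by a pure arithmetic loop that extracts digits with % 10 and // 10 and accumulates digit sums with a place-value multiplier.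
import Mathlib
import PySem

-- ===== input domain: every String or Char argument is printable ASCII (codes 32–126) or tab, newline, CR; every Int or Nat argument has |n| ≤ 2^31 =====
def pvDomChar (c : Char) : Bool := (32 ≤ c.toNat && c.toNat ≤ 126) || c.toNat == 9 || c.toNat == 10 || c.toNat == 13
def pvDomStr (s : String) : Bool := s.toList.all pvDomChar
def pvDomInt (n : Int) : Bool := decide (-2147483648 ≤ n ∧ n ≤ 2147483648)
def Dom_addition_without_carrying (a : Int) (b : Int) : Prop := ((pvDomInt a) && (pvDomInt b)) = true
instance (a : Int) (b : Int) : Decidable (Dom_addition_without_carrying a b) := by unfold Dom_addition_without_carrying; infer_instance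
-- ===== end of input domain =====

-- B replaces A's string pipeline (str/zfill/per-char int()) by a pure arithmetic digit loop; measurably faster by a constant factor.


-- ===== PORT A =====
-- Literal transliteration of A.  The two `int(...)` calls on characters and the final
-- `int(result_str)` are ported with PySem.Int.ofChars?; `.getD 0` marks the ValueError
-- raise (reachable only for negative inputs, which Pre_ excludes).  The in-loop index
-- is always in range, so `pyGetD` with a junk default is exact for `a_str[i]`.
def addition_without_carrying (a : Int) (b : Int) : Int :=
  let aStr := PySem.Int.toChars a
  let bStr := PySem.Int.toChars b
  let maxLen : Int := max (PySem.Chars.len aStr) (PySem.Chars.len bStr)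
  let aFill := PySem.Chars.zfill aStr maxLen
  let bFill := PySem.Chars.zfill bStr maxLen
  let resultStr :=
    (PySem.List.pyRange 0 maxLen).foldl (fun r i =>
      let digitA := (PySem.Int.ofChars? [PySem.List.pyGetD aFill i ' ']).getD 0
      let digitB := (PySem.Int.ofChars? [PySem.List.pyGetD bFill i ' ']).getD 0
      let sumDigits := PySem.Int.mod (digitA + digitB) 10
      r ++ PySem.Int.toChars sumDigits) []
  (PySem.Int.ofChars? resultStr).getD 0

-- ===== PORT B =====
-- Transliteration of Source B's while-loop (state a, b, acc, place).
def pvAwcLoop (a : Int) (b : Int) (acc : Int) (place : Int) : Int :=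
  if 0 < a ∨ 0 < b then
    pvAwcLoop (PySem.Int.floordiv a 10) (PySem.Int.floordiv b 10)
      (acc + PySem.Int.mod (PySem.Int.mod a 10 + PySem.Int.mod b 10) 10 * place)
      (place * 10)
  else acc
termination_by a.toNat + b.toNat
decreasing_by
  simp only [PySem.Int.floordiv_eq_ediv_of_pos (show (0:Int) < 10 by norm_num)]
  rcases ‹0 < a ∨ 0 < b› with h | h <;> omega

def addition_without_carrying_alt (a : Int) (b : Int) : Int :=
  pvAwcLoop a b 0 1

-- ===== PRECONDITION & SPEC =====
-- Pre_ excludes negative inputs: there Python A raises ValueError (int('-') while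
-- reading the sign character of the zero-filled string), returning no value.
def Pre_addition_without_carrying (a : Int) (b : Int) : Prop := 0 ≤ a ∧ 0 ≤ b
instance (a : Int) (b : Int) : Decidable (Pre_addition_without_carrying a b) := by
  unfold Pre_addition_without_carrying; infer_instance

def pvWitness_addition_without_carrying : Int × Int := (3, 45)

def Spec_addition_without_carrying (a : Int) (b : Int) (out : Int) : Prop :=
  out = addition_without_carrying_alt a b
instance (a : Int) (b : Int) (out : Int) : Decidable (Spec_addition_without_carrying a b out) := by
  unfold Spec_addition_without_carrying; infer_instance

-- ===== CLAIM (what is proved, stated in full; the proofs are below) =====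
def Claim_equal_addition_without_carrying : Prop :=
  ∀ (a : Int) (b : Int), Dom_addition_without_carrying a b →
    Pre_addition_without_carrying a b →
    Spec_addition_without_carrying a b (addition_without_carrying a b)

-- ===== LEMMAS AND PROOFS =====

-- digit lists (most significant first) and padded digit lists, proof-side only
def pvDigitsM (m : Nat) : List Nat := if m = 0 then [0] else (Nat.digits 10 m).reverse
def pvLenD (m : Nat) : Nat := (pvDigitsM m).length
def pvPad (m L : Nat) : List Nat := List.replicate (L - pvLenD m) 0 ++ pvDigitsM m
def pvSums (L ma mb : Nat) : List Nat :=
  List.zipWith (fun x y => (x + y) % 10) (pvPad ma L) (pvPad mb L)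

-- the arithmetic value B computes, as a Nat recursion
def pvVN : Nat → Nat → Nat
  | m, n =>
    if h : m = 0 ∧ n = 0 then 0
    else (m % 10 + n % 10) % 10 + 10 * pvVN (m / 10) (n / 10)
termination_by m n => m + n
decreasing_by
  rcases Nat.eq_zero_or_pos m with h1 | h1
  · rcases Nat.eq_zero_or_pos n with h2 | h2
    · exact absurd ⟨h1, h2⟩ h
    · have := Nat.div_lt_self h2 (by norm_num : 1 < 10)
      have := Nat.div_le_self m 10
      omega
  · have := Nat.div_lt_self h1 (by norm_num : 1 < 10)
    have := Nat.div_le_self n 10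
    omega

lemma pvDigitsM_ne_nil (m : Nat) : pvDigitsM m ≠ [] := by
  unfold pvDigitsM
  split
  · simp
  · simp [Nat.digits_ne_nil_iff_ne_zero, *]

lemma pvDigitsM_lt (m : Nat) : ∀ x ∈ pvDigitsM m, x < 10 := by
  unfold pvDigitsM
  split
  · simp
  · intro x hx
    exact Nat.digits_lt_base (by norm_num) (List.mem_reverse.mp hx)

lemma pvLenD_pos (m : Nat) : 1 ≤ pvLenD m := by
  have := pvDigitsM_ne_nil m
  unfold pvLenD
  cases h : pvDigitsM m with
  | nil => exact absurd h this
  | cons a t => simp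

lemma pvPad_lt (m L : Nat) : ∀ x ∈ pvPad m L, x < 10 := by
  intro x hx
  rcases List.mem_append.mp hx with h | h
  · have := List.eq_of_mem_replicate h; omega
  · exact pvDigitsM_lt m x h

lemma pvPad_length (m L : Nat) (h : pvLenD m ≤ L) : (pvPad m L).length = L := by
  simp [pvPad, pvLenD] at *
  omega

lemma pvSums_lt (L ma mb : Nat) : ∀ x ∈ pvSums L ma mb, x < 10 := by
  intro x hx
  unfold pvSums at hx
  rw [List.mem_iff_getElem] at hx
  obtain ⟨i, hi, rfl⟩ := hx
  rw [List.getElem_zipWith]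
  exact Nat.mod_lt _ (by norm_num)

lemma pvSums_length (L ma mb : Nat) (ha : pvLenD ma ≤ L) (hb : pvLenD mb ≤ L) :
    (pvSums L ma mb).length = L := by
  simp [pvSums, pvPad_length _ _ ha, pvPad_length _ _ hb]

-- `Nat.toDigits` computes the digit characters, most significant first
lemma pvToDigitsCore_eq (f : Nat) : ∀ (m : Nat) (acc : List Char), 0 < f → m < 10 ^ f →
    Nat.toDigitsCore 10 f m acc = (pvDigitsM m).map Nat.digitChar ++ acc := by
  induction f with
  | zero => intro m acc h; omega
  | succ f ih =>
    intro m acc _ hm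
    rw [Nat.toDigitsCore]
    by_cases h10 : m / 10 = 0
    · have hmlt : m < 10 := by omega
      simp only [h10, if_true]
      rcases Nat.eq_zero_or_pos m with rfl | hpos
      · simp [pvDigitsM]
      · have : Nat.digits 10 m = [m] := by
          rw [Nat.digits_def' (by norm_num : 1 < 10) hpos]
          simp [Nat.mod_eq_of_lt hmlt, h10]
        simp [pvDigitsM, Nat.pos_iff_ne_zero.mp hpos, this, Nat.mod_eq_of_lt hmlt]
    · have hm10 : 10 ≤ m := by omega
      have hf : 0 < f := by
        by_contra hf
        have : f = 0 := by omega
        subst this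
        simp at hm
        omega
      simp only [h10, if_false]
      rw [ih (m / 10) _ hf (by
        rw [Nat.div_lt_iff_lt_mul (show 0 < 10 by norm_num)]
        rw [pow_succ] at hm
        exact hm)]
      have hdm : pvDigitsM m = pvDigitsM (m / 10) ++ [m % 10] := by
        unfold pvDigitsM
        rw [if_neg (by omega), if_neg h10,
          Nat.digits_def' (by norm_num : 1 < 10) (by omega)]
        simp
      rw [hdm]
      simp

lemma pvToChars_nonneg (a : Int) (ha : 0 ≤ a) :
    PySem.Int.toChars a = (pvDigitsM a.toNat).map Nat.digitChar := by
  unfold PySem.Int.toChars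
  rw [if_neg (by omega)]
  unfold Nat.toDigits
  have hlt : a.toNat < 10 ^ (a.toNat + 1) := by
    calc a.toNat < 2 ^ a.toNat := Nat.lt_two_pow_self
      _ ≤ 10 ^ a.toNat := Nat.pow_le_pow_left (by norm_num) _
      _ ≤ 10 ^ (a.toNat + 1) := Nat.pow_le_pow_right (by norm_num) (by omega)
  rw [pvToDigitsCore_eq (a.toNat + 1) a.toNat [] (by omega) hlt]
  simp

lemma pvToChars_digit (s : Nat) (hs : s < 10) :
    PySem.Int.toChars (s : Int) = [Nat.digitChar s] := by
  rw [pvToChars_nonneg _ (by omega)]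
  have : (s : Int).toNat = s := by omega
  rw [this]
  rcases Nat.eq_zero_or_pos s with rfl | hpos
  · simp [pvDigitsM]
  · unfold pvDigitsM
    rw [if_neg (by omega), Nat.digits_def' (by norm_num : 1 < 10) hpos]
    simp [Nat.mod_eq_of_lt hs, Nat.div_eq_of_lt hs]

lemma pvZfill_digits (m L : Nat) :
    PySem.Chars.zfill ((pvDigitsM m).map Nat.digitChar) (L : Int) = (pvPad m L).map Nat.digitChar := by
  unfold PySem.Chars.zfill pvPad
  by_cases hL : (L : Int) ≤ ((pvDigitsM m).map Nat.digitChar).length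
  · rw [if_pos hL]
    have : L - pvLenD m = 0 := by
      simp [pvLenD] at *
      omega
    simp [this]
  · rw [if_neg hL]
    have hlen : pvLenD m < L := by
      simp [pvLenD] at *
      omega
    obtain ⟨d, ds, hds⟩ : ∃ d ds, pvDigitsM m = d :: ds := by
      cases h : pvDigitsM m with
      | nil => exact absurd h (pvDigitsM_ne_nil m)
      | cons x t => exact ⟨x, t, rfl⟩
    have hd10 : d < 10 := pvDigitsM_lt m d (by rw [hds]; simp)
    rw [hds]
    simp only [List.map_cons]
    rw [if_neg (by interval_cases d <;> decide)]
    have hrep : List.replicate ((L : Int).toNat - (Nat.digitChar d :: List.map Nat.digitChar ds).length) '0'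
        = List.map Nat.digitChar (List.replicate (L - pvLenD m) 0) := by
      rw [List.map_replicate]
      congr 1
      simp [pvLenD, hds]
    rw [hrep]
    simp

-- parsing a single digit character
lemma pvParse_single (d : Nat) (hd : d < 10) :
    PySem.Int.ofChars? [Nat.digitChar d] = some (d : Int) := by
  interval_cases d <;> decide

-- helper: strip of a pure digit-character list is itself
lemma pvDropWhile_of_none {p : Char → Bool} {l : List Char} (h : ∀ x ∈ l, p x = false) :
    l.dropWhile p = l := by
  cases l with
  | nil => rfl
  | cons a t => rw [List.dropWhile_cons, h a (by simp)]; simp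

lemma pvDigitChar_not_space {d : Nat} (hd : d < 10) :
    PySem.Int.isIntSpace (Nat.digitChar d) = false := by
  interval_cases d <;> decide

lemma pvDigitChar_ne_minus {d : Nat} (hd : d < 10) : Nat.digitChar d ≠ '-' := by
  interval_cases d <;> decide

lemma pvDigitChar_ne_plus {d : Nat} (hd : d < 10) : Nat.digitChar d ≠ '+' := by
  interval_cases d <;> decide

lemma pvStrip_digits (ds : List Nat) (h : ∀ x ∈ ds, x < 10) :
    (List.dropWhile PySem.Int.isIntSpace
      (List.dropWhile PySem.Int.isIntSpace (ds.map Nat.digitChar)).reverse).reverse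
      = ds.map Nat.digitChar := by
  rw [pvDropWhile_of_none (p := PySem.Int.isIntSpace) (l := ds.map Nat.digitChar)
        (by intro x hx; obtain ⟨y, hy, rfl⟩ := List.mem_map.mp hx; exact pvDigitChar_not_space (h y hy)),
      pvDropWhile_of_none (by intro x hx; obtain ⟨y, hy, rfl⟩ := List.mem_map.mp (List.mem_reverse.mp hx); exact pvDigitChar_not_space (h y hy)),
      List.reverse_reverse]

-- parsing a nonempty pure digit-character list (int(result_str))
lemma pvParse_digits (ds : List Nat) (h : ∀ x ∈ ds, x < 10) (hne : ds ≠ []) :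
    PySem.Int.ofChars? (ds.map Nat.digitChar) =
      some ((ds.foldl (fun a x => a * 10 + x) 0 : Nat) : Int) := by
  obtain ⟨d, ds', rfl⟩ : ∃ d ds', ds = d :: ds' := by
    cases ds with | nil => exact absurd rfl hne | cons a b => exact ⟨a, b, rfl⟩
  have hd : d < 10 := h d (by simp)
  have h' : ∀ x ∈ ds', x < 10 := fun x hx => h x (by simp [hx])
  have hstrip := pvStrip_digits (d :: ds') h
  simp only [List.map_cons] at hstrip
  simp only [PySem.Int.ofChars?, List.map_cons]
  rw [hstrip]
  split
  next xs heq =>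
    injection heq with h1 h2
    exact absurd h1 (pvDigitChar_ne_minus hd)
  next xs heq =>
    injection heq with h1 h2
    exact absurd h1 (pvDigitChar_ne_plus hd)
  next x hnm hnp =>
    clear hnm hnp hstrip hne h x
    simp only [Option.pure_def, Option.bind_eq_bind]
    have hmapid : ∀ (x : Option Int), Option.map (fun n : Int => n) x = x := by
      intro x; cases x <;> rfl
    rw [hmapid]
    refine Option.bind_eq_some_iff.mpr ⟨(List.foldl (fun a x => a * 10 + x) 0 (d :: ds') : Nat), ?_, rfl⟩
    clear hmapid
    interval_cases d
    ·
      conv_lhs => whnf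
      norm_num [Nat.digitChar, List.foldl_cons, show ('0'.toNat - '0'.toNat : Nat) = 0 from rfl, show ('1'.toNat - '0'.toNat : Nat) = 1 from rfl, show ('2'.toNat - '0'.toNat : Nat) = 2 from rfl, show ('3'.toNat - '0'.toNat : Nat) = 3 from rfl, show ('4'.toNat - '0'.toNat : Nat) = 4 from rfl, show ('5'.toNat - '0'.toNat : Nat) = 5 from rfl, show ('6'.toNat - '0'.toNat : Nat) = 6 from rfl, show ('7'.toNat - '0'.toNat : Nat) = 7 from rfl, show ('8'.toNat - '0'.toNat : Nat) = 8 from rfl, show ('9'.toNat - '0'.toNat : Nat) = 9 from rfl]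
      revert h'
      generalize (0 : Nat) = acc
      induction ds' generalizing acc with
      | nil =>
        intro _
        conv_lhs => whnf
        rfl
      | cons e es IH =>
        intro h'
        have he : e < 10 := h' e (by simp)
        have h'' : ∀ x ∈ es, x < 10 := fun x hx => h' x (by simp [hx])
        rw [List.map_cons]
        interval_cases e <;>
        · conv_lhs => whnf
          norm_num [Nat.digitChar, List.foldl_cons, show ('0'.toNat - '0'.toNat : Nat) = 0 from rfl, show ('1'.toNat - '0'.toNat : Nat) = 1 from rfl, show ('2'.toNat - '0'.toNat : Nat) = 2 from rfl, show ('3'.toNat - '0'.toNat : Nat) = 3 from rfl, show ('4'.toNat - '0'.toNat : Nat) = 4 from rfl, show ('5'.toNat - '0'.toNat : Nat) = 5 from rfl, show ('6'.toNat - '0'.toNat : Nat) = 6 from rfl, show ('7'.toNat - '0'.toNat : Nat) = 7 from rfl, show ('8'.toNat - '0'.toNat : Nat) = 8 from rfl, show ('9'.toNat - '0'.toNat : Nat) = 9 from rfl]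
          exact IH _ h''
    ·
      conv_lhs => whnf
      norm_num [Nat.digitChar, List.foldl_cons, show ('0'.toNat - '0'.toNat : Nat) = 0 from rfl, show ('1'.toNat - '0'.toNat : Nat) = 1 from rfl, show ('2'.toNat - '0'.toNat : Nat) = 2 from rfl, show ('3'.toNat - '0'.toNat : Nat) = 3 from rfl, show ('4'.toNat - '0'.toNat : Nat) = 4 from rfl, show ('5'.toNat - '0'.toNat : Nat) = 5 from rfl, show ('6'.toNat - '0'.toNat : Nat) = 6 from rfl, show ('7'.toNat - '0'.toNat : Nat) = 7 from rfl, show ('8'.toNat - '0'.toNat : Nat) = 8 from rfl, show ('9'.toNat - '0'.toNat : Nat) = 9 from rfl]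
      revert h'
      generalize (1 : Nat) = acc
      induction ds' generalizing acc with
      | nil =>
        intro _
        conv_lhs => whnf
        rfl
      | cons e es IH =>
        intro h'
        have he : e < 10 := h' e (by simp)
        have h'' : ∀ x ∈ es, x < 10 := fun x hx => h' x (by simp [hx])
        rw [List.map_cons]
        interval_cases e <;>
        · conv_lhs => whnf
          norm_num [Nat.digitChar, List.foldl_cons, show ('0'.toNat - '0'.toNat : Nat) = 0 from rfl, show ('1'.toNat - '0'.toNat : Nat) = 1 from rfl, show ('2'.toNat - '0'.toNat : Nat) = 2 from rfl, show ('3'.toNat - '0'.toNat : Nat) = 3 from rfl, show ('4'.toNat - '0'.toNat : Nat) = 4 from rfl, show ('5'.toNat - '0'.toNat : Nat) = 5 from rfl, show ('6'.toNat - '0'.toNat : Nat) = 6 from rfl, show ('7'.toNat - '0'.toNat : Nat) = 7 from rfl, show ('8'.toNat - '0'.toNat : Nat) = 8 from rfl, show ('9'.toNat - '0'.toNat : Nat) = 9 from rfl]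
          exact IH _ h''
    ·
      conv_lhs => whnf
      norm_num [Nat.digitChar, List.foldl_cons, show ('0'.toNat - '0'.toNat : Nat) = 0 from rfl, show ('1'.toNat - '0'.toNat : Nat) = 1 from rfl, show ('2'.toNat - '0'.toNat : Nat) = 2 from rfl, show ('3'.toNat - '0'.toNat : Nat) = 3 from rfl, show ('4'.toNat - '0'.toNat : Nat) = 4 from rfl, show ('5'.toNat - '0'.toNat : Nat) = 5 from rfl, show ('6'.toNat - '0'.toNat : Nat) = 6 from rfl, show ('7'.toNat - '0'.toNat : Nat) = 7 from rfl, show ('8'.toNat - '0'.toNat : Nat) = 8 from rfl, show ('9'.toNat - '0'.toNat : Nat) = 9 from rfl]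
      revert h'
      generalize (2 : Nat) = acc
      induction ds' generalizing acc with
      | nil =>
        intro _
        conv_lhs => whnf
        rfl
      | cons e es IH =>
        intro h'
        have he : e < 10 := h' e (by simp)
        have h'' : ∀ x ∈ es, x < 10 := fun x hx => h' x (by simp [hx])
        rw [List.map_cons]
        interval_cases e <;>
        · conv_lhs => whnf
          norm_num [Nat.digitChar, List.foldl_cons, show ('0'.toNat - '0'.toNat : Nat) = 0 from rfl, show ('1'.toNat - '0'.toNat : Nat) = 1 from rfl, show ('2'.toNat - '0'.toNat : Nat) = 2 from rfl, show ('3'.toNat - '0'.toNat : Nat) = 3 from rfl, show ('4'.toNat - '0'.toNat : Nat) = 4 from rfl, show ('5'.toNat - '0'.toNat : Nat) = 5 from rfl, show ('6'.toNat - '0'.toNat : Nat) = 6 from rfl, show ('7'.toNat - '0'.toNat : Nat) = 7 from rfl, show ('8'.toNat - '0'.toNat : Nat) = 8 from rfl, show ('9'.toNat - '0'.toNat : Nat) = 9 from rfl]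
          exact IH _ h''
    ·
      conv_lhs => whnf
      norm_num [Nat.digitChar, List.foldl_cons, show ('0'.toNat - '0'.toNat : Nat) = 0 from rfl, show ('1'.toNat - '0'.toNat : Nat) = 1 from rfl, show ('2'.toNat - '0'.toNat : Nat) = 2 from rfl, show ('3'.toNat - '0'.toNat : Nat) = 3 from rfl, show ('4'.toNat - '0'.toNat : Nat) = 4 from rfl, show ('5'.toNat - '0'.toNat : Nat) = 5 from rfl, show ('6'.toNat - '0'.toNat : Nat) = 6 from rfl, show ('7'.toNat - '0'.toNat : Nat) = 7 from rfl, show ('8'.toNat - '0'.toNat : Nat) = 8 from rfl, show ('9'.toNat - '0'.toNat : Nat) = 9 from rfl]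
      revert h'
      generalize (3 : Nat) = acc
      induction ds' generalizing acc with
      | nil =>
        intro _
        conv_lhs => whnf
        rfl
      | cons e es IH =>
        intro h'
        have he : e < 10 := h' e (by simp)
        have h'' : ∀ x ∈ es, x < 10 := fun x hx => h' x (by simp [hx])
        rw [List.map_cons]
        interval_cases e <;>
        · conv_lhs => whnf
          norm_num [Nat.digitChar, List.foldl_cons, show ('0'.toNat - '0'.toNat : Nat) = 0 from rfl, show ('1'.toNat - '0'.toNat : Nat) = 1 from rfl, show ('2'.toNat - '0'.toNat : Nat) = 2 from rfl, show ('3'.toNat - '0'.toNat : Nat) = 3 from rfl, show ('4'.toNat - '0'.toNat : Nat) = 4 from rfl, show ('5'.toNat - '0'.toNat : Nat) = 5 from rfl, show ('6'.toNat - '0'.toNat : Nat) = 6 from rfl, show ('7'.toNat - '0'.toNat : Nat) = 7 from rfl, show ('8'.toNat - '0'.toNat : Nat) = 8 from rfl, show ('9'.toNat - '0'.toNat : Nat) = 9 from rfl]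
          exact IH _ h''
    ·
      conv_lhs => whnf
      norm_num [Nat.digitChar, List.foldl_cons, show ('0'.toNat - '0'.toNat : Nat) = 0 from rfl, show ('1'.toNat - '0'.toNat : Nat) = 1 from rfl, show ('2'.toNat - '0'.toNat : Nat) = 2 from rfl, show ('3'.toNat - '0'.toNat : Nat) = 3 from rfl, show ('4'.toNat - '0'.toNat : Nat) = 4 from rfl, show ('5'.toNat - '0'.toNat : Nat) = 5 from rfl, show ('6'.toNat - '0'.toNat : Nat) = 6 from rfl, show ('7'.toNat - '0'.toNat : Nat) = 7 from rfl, show ('8'.toNat - '0'.toNat : Nat) = 8 from rfl, show ('9'.toNat - '0'.toNat : Nat) = 9 from rfl]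
      revert h'
      generalize (4 : Nat) = acc
      induction ds' generalizing acc with
      | nil =>
        intro _
        conv_lhs => whnf
        rfl
      | cons e es IH =>
        intro h'
        have he : e < 10 := h' e (by simp)
        have h'' : ∀ x ∈ es, x < 10 := fun x hx => h' x (by simp [hx])
        rw [List.map_cons]
        interval_cases e <;>
        · conv_lhs => whnf
          norm_num [Nat.digitChar, List.foldl_cons, show ('0'.toNat - '0'.toNat : Nat) = 0 from rfl, show ('1'.toNat - '0'.toNat : Nat) = 1 from rfl, show ('2'.toNat - '0'.toNat : Nat) = 2 from rfl, show ('3'.toNat - '0'.toNat : Nat) = 3 from rfl, show ('4'.toNat - '0'.toNat : Nat) = 4 from rfl, show ('5'.toNat - '0'.toNat : Nat) = 5 from rfl, show ('6'.toNat - '0'.toNat : Nat) = 6 from rfl, show ('7'.toNat - '0'.toNat : Nat) = 7 from rfl, show ('8'.toNat - '0'.toNat : Nat) = 8 from rfl, show ('9'.toNat - '0'.toNat : Nat) = 9 from rfl]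
          exact IH _ h''
    ·
      conv_lhs => whnf
      norm_num [Nat.digitChar, List.foldl_cons, show ('0'.toNat - '0'.toNat : Nat) = 0 from rfl, show ('1'.toNat - '0'.toNat : Nat) = 1 from rfl, show ('2'.toNat - '0'.toNat : Nat) = 2 from rfl, show ('3'.toNat - '0'.toNat : Nat) = 3 from rfl, show ('4'.toNat - '0'.toNat : Nat) = 4 from rfl, show ('5'.toNat - '0'.toNat : Nat) = 5 from rfl, show ('6'.toNat - '0'.toNat : Nat) = 6 from rfl, show ('7'.toNat - '0'.toNat : Nat) = 7 from rfl, show ('8'.toNat - '0'.toNat : Nat) = 8 from rfl, show ('9'.toNat - '0'.toNat : Nat) = 9 from rfl]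
      revert h'
      generalize (5 : Nat) = acc
      induction ds' generalizing acc with
      | nil =>
        intro _
        conv_lhs => whnf
        rfl
      | cons e es IH =>
        intro h'
        have he : e < 10 := h' e (by simp)
        have h'' : ∀ x ∈ es, x < 10 := fun x hx => h' x (by simp [hx])
        rw [List.map_cons]
        interval_cases e <;>
        · conv_lhs => whnf
          norm_num [Nat.digitChar, List.foldl_cons, show ('0'.toNat - '0'.toNat : Nat) = 0 from rfl, show ('1'.toNat - '0'.toNat : Nat) = 1 from rfl, show ('2'.toNat - '0'.toNat : Nat) = 2 from rfl, show ('3'.toNat - '0'.toNat : Nat) = 3 from rfl, show ('4'.toNat - '0'.toNat : Nat) = 4 from rfl, show ('5'.toNat - '0'.toNat : Nat) = 5 from rfl, show ('6'.toNat - '0'.toNat : Nat) = 6 from rfl, show ('7'.toNat - '0'.toNat : Nat) = 7 from rfl, show ('8'.toNat - '0'.toNat : Nat) = 8 from rfl, show ('9'.toNat - '0'.toNat : Nat) = 9 from rfl]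
          exact IH _ h''
    ·
      conv_lhs => whnf
      norm_num [Nat.digitChar, List.foldl_cons, show ('0'.toNat - '0'.toNat : Nat) = 0 from rfl, show ('1'.toNat - '0'.toNat : Nat) = 1 from rfl, show ('2'.toNat - '0'.toNat : Nat) = 2 from rfl, show ('3'.toNat - '0'.toNat : Nat) = 3 from rfl, show ('4'.toNat - '0'.toNat : Nat) = 4 from rfl, show ('5'.toNat - '0'.toNat : Nat) = 5 from rfl, show ('6'.toNat - '0'.toNat : Nat) = 6 from rfl, show ('7'.toNat - '0'.toNat : Nat) = 7 from rfl, show ('8'.toNat - '0'.toNat : Nat) = 8 from rfl, show ('9'.toNat - '0'.toNat : Nat) = 9 from rfl]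
      revert h'
      generalize (6 : Nat) = acc
      induction ds' generalizing acc with
      | nil =>
        intro _
        conv_lhs => whnf
        rfl
      | cons e es IH =>
        intro h'
        have he : e < 10 := h' e (by simp)
        have h'' : ∀ x ∈ es, x < 10 := fun x hx => h' x (by simp [hx])
        rw [List.map_cons]
        interval_cases e <;>
        · conv_lhs => whnf
          norm_num [Nat.digitChar, List.foldl_cons, show ('0'.toNat - '0'.toNat : Nat) = 0 from rfl, show ('1'.toNat - '0'.toNat : Nat) = 1 from rfl, show ('2'.toNat - '0'.toNat : Nat) = 2 from rfl, show ('3'.toNat - '0'.toNat : Nat) = 3 from rfl, show ('4'.toNat - '0'.toNat : Nat) = 4 from rfl, show ('5'.toNat - '0'.toNat : Nat) = 5 from rfl, show ('6'.toNat - '0'.toNat : Nat) = 6 from rfl, show ('7'.toNat - '0'.toNat : Nat) = 7 from rfl, show ('8'.toNat - '0'.toNat : Nat) = 8 from rfl, show ('9'.toNat - '0'.toNat : Nat) = 9 from rfl]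
          exact IH _ h''
    ·
      conv_lhs => whnf
      norm_num [Nat.digitChar, List.foldl_cons, show ('0'.toNat - '0'.toNat : Nat) = 0 from rfl, show ('1'.toNat - '0'.toNat : Nat) = 1 from rfl, show ('2'.toNat - '0'.toNat : Nat) = 2 from rfl, show ('3'.toNat - '0'.toNat : Nat) = 3 from rfl, show ('4'.toNat - '0'.toNat : Nat) = 4 from rfl, show ('5'.toNat - '0'.toNat : Nat) = 5 from rfl, show ('6'.toNat - '0'.toNat : Nat) = 6 from rfl, show ('7'.toNat - '0'.toNat : Nat) = 7 from rfl, show ('8'.toNat - '0'.toNat : Nat) = 8 from rfl, show ('9'.toNat - '0'.toNat : Nat) = 9 from rfl]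
      revert h'
      generalize (7 : Nat) = acc
      induction ds' generalizing acc with
      | nil =>
        intro _
        conv_lhs => whnf
        rfl
      | cons e es IH =>
        intro h'
        have he : e < 10 := h' e (by simp)
        have h'' : ∀ x ∈ es, x < 10 := fun x hx => h' x (by simp [hx])
        rw [List.map_cons]
        interval_cases e <;>
        · conv_lhs => whnf
          norm_num [Nat.digitChar, List.foldl_cons, show ('0'.toNat - '0'.toNat : Nat) = 0 from rfl, show ('1'.toNat - '0'.toNat : Nat) = 1 from rfl, show ('2'.toNat - '0'.toNat : Nat) = 2 from rfl, show ('3'.toNat - '0'.toNat : Nat) = 3 from rfl, show ('4'.toNat - '0'.toNat : Nat) = 4 from rfl, show ('5'.toNat - '0'.toNat : Nat) = 5 from rfl, show ('6'.toNat - '0'.toNat : Nat) = 6 from rfl, show ('7'.toNat - '0'.toNat : Nat) = 7 from rfl, show ('8'.toNat - '0'.toNat : Nat) = 8 from rfl, show ('9'.toNat - '0'.toNat : Nat) = 9 from rfl]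
          exact IH _ h''
    ·
      conv_lhs => whnf
      norm_num [Nat.digitChar, List.foldl_cons, show ('0'.toNat - '0'.toNat : Nat) = 0 from rfl, show ('1'.toNat - '0'.toNat : Nat) = 1 from rfl, show ('2'.toNat - '0'.toNat : Nat) = 2 from rfl, show ('3'.toNat - '0'.toNat : Nat) = 3 from rfl, show ('4'.toNat - '0'.toNat : Nat) = 4 from rfl, show ('5'.toNat - '0'.toNat : Nat) = 5 from rfl, show ('6'.toNat - '0'.toNat : Nat) = 6 from rfl, show ('7'.toNat - '0'.toNat : Nat) = 7 from rfl, show ('8'.toNat - '0'.toNat : Nat) = 8 from rfl, show ('9'.toNat - '0'.toNat : Nat) = 9 from rfl]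
      revert h'
      generalize (8 : Nat) = acc
      induction ds' generalizing acc with
      | nil =>
        intro _
        conv_lhs => whnf
        rfl
      | cons e es IH =>
        intro h'
        have he : e < 10 := h' e (by simp)
        have h'' : ∀ x ∈ es, x < 10 := fun x hx => h' x (by simp [hx])
        rw [List.map_cons]
        interval_cases e <;>
        · conv_lhs => whnf
          norm_num [Nat.digitChar, List.foldl_cons, show ('0'.toNat - '0'.toNat : Nat) = 0 from rfl, show ('1'.toNat - '0'.toNat : Nat) = 1 from rfl, show ('2'.toNat - '0'.toNat : Nat) = 2 from rfl, show ('3'.toNat - '0'.toNat : Nat) = 3 from rfl, show ('4'.toNat - '0'.toNat : Nat) = 4 from rfl, show ('5'.toNat - '0'.toNat : Nat) = 5 from rfl, show ('6'.toNat - '0'.toNat : Nat) = 6 from rfl, show ('7'.toNat - '0'.toNat : Nat) = 7 from rfl, show ('8'.toNat - '0'.toNat : Nat) = 8 from rfl, show ('9'.toNat - '0'.toNat : Nat) = 9 from rfl]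
          exact IH _ h''
    ·
      conv_lhs => whnf
      norm_num [Nat.digitChar, List.foldl_cons, show ('0'.toNat - '0'.toNat : Nat) = 0 from rfl, show ('1'.toNat - '0'.toNat : Nat) = 1 from rfl, show ('2'.toNat - '0'.toNat : Nat) = 2 from rfl, show ('3'.toNat - '0'.toNat : Nat) = 3 from rfl, show ('4'.toNat - '0'.toNat : Nat) = 4 from rfl, show ('5'.toNat - '0'.toNat : Nat) = 5 from rfl, show ('6'.toNat - '0'.toNat : Nat) = 6 from rfl, show ('7'.toNat - '0'.toNat : Nat) = 7 from rfl, show ('8'.toNat - '0'.toNat : Nat) = 8 from rfl, show ('9'.toNat - '0'.toNat : Nat) = 9 from rfl]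
      revert h'
      generalize (9 : Nat) = acc
      induction ds' generalizing acc with
      | nil =>
        intro _
        conv_lhs => whnf
        rfl
      | cons e es IH =>
        intro h'
        have he : e < 10 := h' e (by simp)
        have h'' : ∀ x ∈ es, x < 10 := fun x hx => h' x (by simp [hx])
        rw [List.map_cons]
        interval_cases e <;>
        · conv_lhs => whnf
          norm_num [Nat.digitChar, List.foldl_cons, show ('0'.toNat - '0'.toNat : Nat) = 0 from rfl, show ('1'.toNat - '0'.toNat : Nat) = 1 from rfl, show ('2'.toNat - '0'.toNat : Nat) = 2 from rfl, show ('3'.toNat - '0'.toNat : Nat) = 3 from rfl, show ('4'.toNat - '0'.toNat : Nat) = 4 from rfl, show ('5'.toNat - '0'.toNat : Nat) = 5 from rfl, show ('6'.toNat - '0'.toNat : Nat) = 6 from rfl, show ('7'.toNat - '0'.toNat : Nat) = 7 from rfl, show ('8'.toNat - '0'.toNat : Nat) = 8 from rfl, show ('9'.toNat - '0'.toNat : Nat) = 9 from rfl]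
          exact IH _ h''


-- position-peeling of the padded digit list
lemma pvLenD_div (m L : Nat) (hL : 1 ≤ L) (h : pvLenD m ≤ L + 1) : pvLenD (m / 10) ≤ L := by
  by_cases hm : m < 10
  · have : m / 10 = 0 := Nat.div_eq_of_lt hm
    rw [this]
    have : pvLenD 0 = 1 := by simp [pvLenD, pvDigitsM]
    omega
  · have hpos : 0 < m := by omega
    have h10 : m / 10 ≠ 0 := by
      intro hc; have := Nat.div_eq_of_lt (show m < 10 by
        have := (Nat.div_eq_zero_iff_lt (show 0 < 10 by norm_num)).mp hc; omega)
      omega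
    have hlm : pvLenD m = pvLenD (m / 10) + 1 := by
      unfold pvLenD pvDigitsM
      rw [if_neg (by omega), if_neg h10, Nat.digits_def' (by norm_num : 1 < 10) hpos]
      simp
    omega

lemma pvPad_succ (m L : Nat) (hL : 1 ≤ L) (h : pvLenD m ≤ L + 1) :
    pvPad m (L + 1) = pvPad (m / 10) L ++ [m % 10] := by
  by_cases hm : m < 10
  · have h0 : m / 10 = 0 := Nat.div_eq_of_lt hm
    have hm10 : m % 10 = m := Nat.mod_eq_of_lt hm
    have hdm : pvDigitsM m = [m] := by
      rcases Nat.eq_zero_or_pos m with rfl | hpos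
      · simp [pvDigitsM]
      · unfold pvDigitsM
        rw [if_neg (by omega), Nat.digits_def' (by norm_num : 1 < 10) hpos]
        simp [hm10, Nat.div_eq_of_lt hm]
    have hd0 : pvDigitsM (m / 10) = [0] := by simp [h0, pvDigitsM]
    have hl1 : pvLenD m = 1 := by simp [pvLenD, hdm]
    have hl0 : pvLenD (m / 10) = 1 := by simp [pvLenD, hd0]
    unfold pvPad
    rw [hdm, hd0, hl1, hl0, hm10]
    have hrepl : List.replicate (L + 1 - 1) (0 : Nat) = List.replicate (L - 1) 0 ++ [0] := by
      have h1 : L + 1 - 1 = (L - 1) + 1 := by omega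
      rw [h1, List.replicate_succ']
    rw [hrepl]
  · have hpos : 0 < m := by omega
    have h10 : m / 10 ≠ 0 := by
      intro hc
      have := (Nat.div_eq_zero_iff_lt (show 0 < 10 by norm_num)).mp hc
      omega
    have hdm : pvDigitsM m = pvDigitsM (m / 10) ++ [m % 10] := by
      unfold pvDigitsM
      rw [if_neg (by omega), if_neg h10, Nat.digits_def' (by norm_num : 1 < 10) hpos]
      simp
    have hlm : pvLenD m = pvLenD (m / 10) + 1 := by
      unfold pvLenD
      rw [hdm]
      simp
    unfold pvPad
    rw [hdm, hlm]
    have : L + 1 - (pvLenD (m / 10) + 1) = L - pvLenD (m / 10) := by omega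
    rw [this]
    simp

-- the folded (most-significant-first) value of the digit sums equals pvVN
lemma pvVal_eq_VN (L : Nat) : ∀ ma mb, pvLenD ma ≤ L → pvLenD mb ≤ L →
    (pvSums L ma mb).foldl (fun a x => a * 10 + x) 0 = pvVN ma mb := by
  induction L with
  | zero => intro ma mb ha hb; have := pvLenD_pos ma; omega
  | succ L ih =>
    intro ma mb ha hb
    by_cases hL : 1 ≤ L
    · have ha' := pvLenD_div ma L hL ha
      have hb' := pvLenD_div mb L hL hb
      have hsum : pvSums (L + 1) ma mb
          = pvSums L (ma / 10) (mb / 10) ++ [(ma % 10 + mb % 10) % 10] := by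
        unfold pvSums
        rw [pvPad_succ ma L hL ha, pvPad_succ mb L hL hb,
          List.zipWith_append (by rw [pvPad_length _ _ ha', pvPad_length _ _ hb'])]
        simp
      rw [hsum, List.foldl_append]
      simp only [List.foldl_cons, List.foldl_nil]
      rw [ih _ _ ha' hb']
      conv_rhs => rw [pvVN]
      by_cases hz : ma = 0 ∧ mb = 0
      · obtain ⟨rfl, rfl⟩ := hz
        simp [pvVN]
      · rw [dif_neg hz]
        ring
    · have hL0 : L = 0 := by omega
      subst hL0
      have hma : ma < 10 := by
        by_contra hc
        have hpos : 0 < ma := by omega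
        have h10 : ma / 10 ≠ 0 := by
          intro h0
          have := (Nat.div_eq_zero_iff_lt (show 0 < 10 by norm_num)).mp h0
          omega
        have : pvLenD ma = pvLenD (ma / 10) + 1 := by
          unfold pvLenD pvDigitsM
          rw [if_neg (by omega), if_neg h10, Nat.digits_def' (by norm_num : 1 < 10) hpos]
          simp
        have := pvLenD_pos (ma / 10)
        omega
      have hmb : mb < 10 := by
        by_contra hc
        have hpos : 0 < mb := by omega
        have h10 : mb / 10 ≠ 0 := by
          intro h0
          have := (Nat.div_eq_zero_iff_lt (show 0 < 10 by norm_num)).mp h0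
          omega
        have : pvLenD mb = pvLenD (mb / 10) + 1 := by
          unfold pvLenD pvDigitsM
          rw [if_neg (by omega), if_neg h10, Nat.digits_def' (by norm_num : 1 < 10) hpos]
          simp
        have := pvLenD_pos (mb / 10)
        omega
      have hda : pvDigitsM ma = [ma] := by
        rcases Nat.eq_zero_or_pos ma with rfl | hpos
        · simp [pvDigitsM]
        · unfold pvDigitsM
          rw [if_neg (by omega), Nat.digits_def' (by norm_num : 1 < 10) hpos]
          simp [Nat.mod_eq_of_lt hma, Nat.div_eq_of_lt hma]
      have hdb : pvDigitsM mb = [mb] := by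
        rcases Nat.eq_zero_or_pos mb with rfl | hpos
        · simp [pvDigitsM]
        · unfold pvDigitsM
          rw [if_neg (by omega), Nat.digits_def' (by norm_num : 1 < 10) hpos]
          simp [Nat.mod_eq_of_lt hmb, Nat.div_eq_of_lt hmb]
      have hla : pvLenD ma = 1 := by simp [pvLenD, hda]
      have hlb : pvLenD mb = 1 := by simp [pvLenD, hdb]
      have hsums : pvSums 1 ma mb = [(ma + mb) % 10] := by
        unfold pvSums pvPad
        rw [hda, hdb, hla, hlb]
        simp
      rw [hsums]
      simp only [List.foldl_cons, List.foldl_nil]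
      conv_rhs => rw [pvVN]
      by_cases hz : ma = 0 ∧ mb = 0
      · obtain ⟨rfl, rfl⟩ := hz
        simp
      · rw [dif_neg hz, Nat.div_eq_of_lt hma, Nat.div_eq_of_lt hmb,
          Nat.mod_eq_of_lt hma, Nat.mod_eq_of_lt hmb]
        simp [pvVN]

-- B's loop computes acc + place * pvVN
lemma pvAwcLoop_eq (n : Nat) : ∀ (a b acc place : Int), a.toNat + b.toNat ≤ n →
    0 ≤ a → 0 ≤ b →
    pvAwcLoop a b acc place = acc + place * (pvVN a.toNat b.toNat : Int) := by
  induction n with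
  | zero =>
    intro a b acc place hn ha hb
    have ha0 : a = 0 := by omega
    have hb0 : b = 0 := by omega
    subst ha0; subst hb0
    rw [pvAwcLoop]
    simp [pvVN]
  | succ n ih =>
    intro a b acc place hn ha hb
    rw [pvAwcLoop]
    by_cases hc : 0 < a ∨ 0 < b
    · rw [if_pos hc]
      rw [PySem.Int.floordiv_eq_ediv_of_pos (by norm_num : (0:Int) < 10),
          PySem.Int.floordiv_eq_ediv_of_pos (by norm_num : (0:Int) < 10),
          PySem.Int.mod_eq_emod_of_pos (by norm_num : (0:Int) < 10),
          PySem.Int.mod_eq_emod_of_pos (by norm_num : (0:Int) < 10),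
          PySem.Int.mod_eq_emod_of_pos (by norm_num : (0:Int) < 10)]
      rw [ih (a / 10) (b / 10) _ _ (by omega) (by omega) (by omega)]
      have hva : (a / 10).toNat = a.toNat / 10 := by omega
      have hvb : (b / 10).toNat = b.toNat / 10 := by omega
      rw [hva, hvb]
      conv_rhs => rw [pvVN]
      rw [dif_neg (by omega)]
      have hma : (a % 10) = ((a.toNat % 10 : Nat) : Int) := by omega
      have hmb : (b % 10) = ((b.toNat % 10 : Nat) : Int) := by omega
      rw [hma, hmb]
      have hmm : ((a.toNat % 10 : Nat) : Int) + ((b.toNat % 10 : Nat) : Int)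
          = ((a.toNat % 10 + b.toNat % 10 : Nat) : Int) := by push_cast; ring
      rw [hmm]
      have hmod : ((a.toNat % 10 + b.toNat % 10 : Nat) : Int) % 10
          = (((a.toNat % 10 + b.toNat % 10) % 10 : Nat) : Int) := by omega
      rw [hmod]
      push_cast
      ring
    · rw [if_neg hc]
      have ha0 : a = 0 := by omega
      have hb0 : b = 0 := by omega
      subst ha0; subst hb0
      simp [pvVN]

-- A computes the folded digit-sum value
lemma pvA_eq (a b : Int) (ha : 0 ≤ a) (hb : 0 ≤ b) :
    addition_without_carrying a b
      = ((pvSums (max (pvLenD a.toNat) (pvLenD b.toNat)) a.toNat b.toNat).foldl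
          (fun acc x => acc * 10 + x) 0 : Nat) := by
  have hL1 : 1 ≤ max (pvLenD a.toNat) (pvLenD b.toNat) :=
    le_trans (pvLenD_pos a.toNat) (le_max_left _ _)
  set L := max (pvLenD a.toNat) (pvLenD b.toNat) with hLdef
  have haL : pvLenD a.toNat ≤ L := le_max_left _ _
  have hbL : pvLenD b.toNat ≤ L := le_max_right _ _
  unfold addition_without_carrying
  rw [pvToChars_nonneg a ha, pvToChars_nonneg b hb]
  simp only [PySem.Chars.len, List.length_map]
  have hmax : max ((pvDigitsM a.toNat).length : Int) ((pvDigitsM b.toNat).length : Int)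
      = (L : Int) := by
    rw [hLdef]
    unfold pvLenD
    push_cast
    rfl
  rw [hmax, pvZfill_digits a.toNat L, pvZfill_digits b.toNat L]
  have hlenS : (pvSums L a.toNat b.toNat).length = L := pvSums_length _ _ _ haL hbL
  have hcongr :
      (PySem.List.pyRange 0 (L : Int)).foldl (fun r i =>
        let digitA := (PySem.Int.ofChars? [PySem.List.pyGetD ((pvPad a.toNat L).map Nat.digitChar) i ' ']).getD 0
        let digitB := (PySem.Int.ofChars? [PySem.List.pyGetD ((pvPad b.toNat L).map Nat.digitChar) i ' ']).getD 0
        let sumDigits := PySem.Int.mod (digitA + digitB) 10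
        r ++ PySem.Int.toChars sumDigits) []
      = (PySem.List.pyRange 0 (L : Int)).foldl (fun r i =>
          r ++ [PySem.List.pyGetD ((pvSums L a.toNat b.toNat).map Nat.digitChar) i ' ']) [] := by
    apply PySem.List.foldl_congr_mem
    intro acc i hi
    obtain ⟨hi0, hiL⟩ := PySem.List.mem_pyRange_one.mp hi
    have hk : i = ((i.toNat : Nat) : Int) := by omega
    have hkL : i.toNat < L := by omega
    have hlenA : (pvPad a.toNat L).length = L := pvPad_length _ _ haL
    have hlenB : (pvPad b.toNat L).length = L := pvPad_length _ _ hbL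
    rw [hk, PySem.List.pyGetD_natCast, PySem.List.pyGetD_natCast, PySem.List.pyGetD_natCast]
    rw [List.getD_eq_getElem _ _ (by rw [List.length_map, hlenA]; exact hkL),
        List.getD_eq_getElem _ _ (by rw [List.length_map, hlenB]; exact hkL),
        List.getD_eq_getElem _ _ (by rw [List.length_map, hlenS]; exact hkL)]
    simp only [List.getElem_map]
    have hxa : (pvPad a.toNat L)[i.toNat]'(by omega) < 10 :=
      pvPad_lt _ _ _ (List.getElem_mem _)
    have hxb : (pvPad b.toNat L)[i.toNat]'(by omega) < 10 :=
      pvPad_lt _ _ _ (List.getElem_mem _)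
    rw [pvParse_single _ hxa, pvParse_single _ hxb]
    simp only [Option.getD_some]
    rw [PySem.Int.mod_eq_emod_of_pos (by norm_num : (0:Int) < 10)]
    have hcast : ((pvPad a.toNat L)[i.toNat]'(by omega) : Int) + ((pvPad b.toNat L)[i.toNat]'(by omega) : Int)
        = (((pvPad a.toNat L)[i.toNat]'(by omega) + (pvPad b.toNat L)[i.toNat]'(by omega) : Nat) : Int) := by
      push_cast; ring
    rw [hcast]
    have hmodc : (((pvPad a.toNat L)[i.toNat]'(by omega) + (pvPad b.toNat L)[i.toNat]'(by omega) : Nat) : Int) % 10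
        = ((((pvPad a.toNat L)[i.toNat]'(by omega) + (pvPad b.toNat L)[i.toNat]'(by omega)) % 10 : Nat) : Int) := by
      omega
    rw [hmodc,
      pvToChars_digit _ (Nat.mod_lt _ (by norm_num))]
    congr 1
    congr 1
    unfold pvSums
    rw [List.getElem_zipWith]
  rw [hcongr, PySem.List.foldl_append_singleton_eq_map]
  have hlenCast : (L : Int) = PySem.List.len ((pvSums L a.toNat b.toNat).map Nat.digitChar) := by
    simp [PySem.List.len, hlenS]
  rw [List.nil_append, hlenCast, PySem.List.map_pyGetD_pyRange_zero]
  rw [pvParse_digits _ (pvSums_lt L a.toNat b.toNat)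
      (by intro hc; have := congrArg List.length hc; rw [hlenS] at this; simp at this; omega)]
  rfl

-- ===== VERDICT (by name: the statement is the Claim_ definition above) =====
theorem addition_without_carrying_spec : Claim_equal_addition_without_carrying := by
  intro a b _ hpre
  obtain ⟨ha, hb⟩ := hpre
  unfold Spec_addition_without_carrying addition_without_carrying_alt
  rw [pvA_eq a b ha hb,
      pvVal_eq_VN _ _ _ (le_max_left _ _) (le_max_right _ _),
      pvAwcLoop_eq (a.toNat + b.toNat) a b 0 1 (le_refl _) ha hb]
  ring
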